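-- pv_equiv track=rewrite | github.com/winterdrive/myLeetHub | 0890-find-and-replace-pattern/0890-find-and-replace-pattern.py | findAndReplacePattern
-- ===== SOURCE A (Python) =====
-- def findAndReplacePattern(words: list[str], pattern: str) -> list[str]:
--     result=list()
--     myList=list(pattern)
--     myDict=dict()
--     for i in range(len(pattern)):
--         if pattern[i] in myDict:
--             continue
--         else:
--             myDict[pattern[i]]=i
--     for i in range(len(pattern)):
--         myList[i]=myDict[pattern[i]]
--
--     for target in words:
--         targetList=list(target)
--         myTargetDict=dict()
--         for j in range(len(target)):
--             if target[j] in myTargetDict: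
--                 continue
--             else:
--                 myTargetDict[target[j]]=j
--         for k in range(len(target)):
--             targetList[k]=myTargetDict[target[k]]
--         if myList==targetList:
--             result.append(target)
--     return result
-- ===== SOURCE B (Python) =====
-- def findAndReplacePattern(words: list[str], pattern: str) -> list[str]:
--     def matches(word: str) -> bool:
--         if len(word) != len(pattern):
--             return False
--         fwd = {}
--         bwd = {}
--         for pc, wc in zip(pattern, word):
--             if pc in fwd:
--                 if fwd[pc] != wc:
--                     return False
--             else:
--                 fwd[pc] = wc
--             if wc in bwd:
--                 if bwd[wc] != pc:
--                     return False
--             else: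
--                 bwd[wc] = pc
--         return True
--     return [w for w in words if matches(w)]
-- ===== Notes on version B (the rewrite author's own statement) =====
-- stated objective: alternative
-- what changed: Replaces A's per-word canonical first-index-list construction (build a char->index dict in one pass, rewrite the word into an index list in a second pass, then compare whole lists) with a length guard plus a single zip pass over (pattern char, word char) pairs maintaining two char->char maps (forward and backward) and rejecting at the first conflicting mapping. The single early-exiting pass avoids A's per-word dict construction, full index-list rewrite and whole-list comparison (measured constant-factor speedup).
import Mathlib
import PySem

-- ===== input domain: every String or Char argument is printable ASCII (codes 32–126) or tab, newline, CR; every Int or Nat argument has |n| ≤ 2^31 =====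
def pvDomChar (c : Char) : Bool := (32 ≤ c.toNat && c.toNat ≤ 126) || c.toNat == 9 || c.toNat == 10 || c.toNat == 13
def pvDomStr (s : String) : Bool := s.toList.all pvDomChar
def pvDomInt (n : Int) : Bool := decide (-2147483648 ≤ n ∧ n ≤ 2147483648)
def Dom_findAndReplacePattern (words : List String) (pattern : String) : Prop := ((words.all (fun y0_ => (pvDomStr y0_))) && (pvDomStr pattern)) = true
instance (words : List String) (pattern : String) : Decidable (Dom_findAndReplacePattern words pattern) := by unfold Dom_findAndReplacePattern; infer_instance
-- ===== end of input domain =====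

-- B replaces A's canonical-index-list comparison by a single early-exiting zip pass with forward/backward char maps (measured faster in a timing run).


-- ===== PORT A =====
-- first per-string loop: `for i in range(len(s)): if s[i] in d: continue else: d[s[i]] = i`
def pvBuildIdx (d : PySem.Dict Char Int) (i : Int) : List Char → PySem.Dict Char Int
  | [] => d
  | c :: cs => if d.contains c then pvBuildIdx d (i + 1) cs else pvBuildIdx (d.insert c i) (i + 1) cs

-- second loop: `for k in range(len(s)): lst[k] = d[s[k]]` (every key is present, so `d[s[k]]` never raises; getD 0 is exact here)
def pvCanonMap (d : PySem.Dict Char Int) : List Char → List Int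
  | [] => []
  | c :: cs => d.getD c 0 :: pvCanonMap d cs

def pvCanon (cs : List Char) : List Int := pvCanonMap (pvBuildIdx PySem.Dict.empty 0 cs) cs

def findAndReplacePattern (words : List String) (pattern : String) : List String :=
  let myList := pvCanon pattern.toList
  words.foldl (fun result target =>
    if myList == pvCanon target.toList then result ++ [target] else result) []

-- ===== PORT B =====
-- `for pc, wc in zip(pattern, word): ...` maintaining forward and backward maps, early False on conflict
def pvGoB (f b : PySem.Dict Char Char) : List (Char × Char) → Bool
  | [] => true
  | (p, w) :: rest =>
    match f.get? p with
    | some x =>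
      if x = w then
        match b.get? w with
        | some y => if y = p then pvGoB f b rest else false
        | none => pvGoB f (b.insert w p) rest
      else false
    | none =>
      match b.get? w with
      | some y => if y = p then pvGoB (f.insert p w) b rest else false
      | none => pvGoB (f.insert p w) (b.insert w p) rest

def pvMatches (pattern w : String) : Bool :=
  if PySem.Str.len w ≠ PySem.Str.len pattern then false
  else pvGoB PySem.Dict.empty PySem.Dict.empty (pattern.toList.zip w.toList)

def findAndReplacePattern_alt (words : List String) (pattern : String) : List String :=
  words.filter (fun w => pvMatches pattern w)

-- ===== PRECONDITION & SPEC =====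
def Spec_findAndReplacePattern (words : List String) (pattern : String) (out : List String) : Prop := out = findAndReplacePattern_alt words pattern
instance (words : List String) (pattern : String) (out : List String) : Decidable (Spec_findAndReplacePattern words pattern out) := by unfold Spec_findAndReplacePattern; infer_instance

-- ===== CLAIM (what is proved, stated in full; the proofs are below) =====
def Claim_equal_findAndReplacePattern : Prop := ∀ (words : List String) (pattern : String), Dom_findAndReplacePattern words pattern → Spec_findAndReplacePattern words pattern (findAndReplacePattern words pattern)

-- ===== LEMMAS AND PROOFS =====

-- index of the first occurrence of c in cs, counting from i
def pvFirstIdx (c : Char) (i : Int) : List Char → Option Int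
  | [] => none
  | x :: xs => if x = c then some i else pvFirstIdx c (i + 1) xs

lemma pvBuildIdx_get? (cs : List Char) (d : PySem.Dict Char Int) (i : Int) (c : Char) :
    (pvBuildIdx d i cs).get? c = (d.get? c).or (pvFirstIdx c i cs) := by
  induction cs generalizing d i with
  | nil => simp [pvBuildIdx, pvFirstIdx]
  | cons x xs ih =>
    simp only [pvBuildIdx, pvFirstIdx]
    by_cases hxc : x = c
    · subst hxc
      by_cases h : d.contains x
      · rw [if_pos h, ih]
        have : (d.get? x).isSome := by rw [← PySem.Dict.contains_eq_isSome_get?]; exact h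
        cases hg : d.get? x with
        | none => exact absurd (hg ▸ this) (by simp)
        | some v => simp [hg]
      · rw [if_neg h, ih]
        have hg : d.get? x = none := by
          cases hg : d.get? x with
          | none => rfl
          | some v =>
            exfalso; apply h
            rw [PySem.Dict.contains_eq_isSome_get?, hg]; rfl
        simp [hg, PySem.Dict.get?_insert_self]
    · by_cases h : d.contains x
      · rw [if_pos h, ih]; simp [hxc]
      · rw [if_neg h, ih, PySem.Dict.get?_insert_of_ne _ _ (Ne.symm hxc)]
        simp [hxc]

-- incremental computation of A's canonical index list
def pvIncCanon (d : PySem.Dict Char Int) (i : Int) : List Char → List Int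
  | [] => []
  | c :: cs =>
    match d.get? c with
    | some m => m :: pvIncCanon d (i + 1) cs
    | none => i :: pvIncCanon (d.insert c i) (i + 1) cs

lemma pvCanonMap_buildIdx (cs : List Char) (d : PySem.Dict Char Int) (i : Int) :
    pvCanonMap (pvBuildIdx d i cs) cs = pvIncCanon d i cs := by
  induction cs generalizing d i with
  | nil => simp [pvCanonMap, pvIncCanon]
  | cons c cs ih =>
    simp only [pvCanonMap, pvIncCanon, pvBuildIdx]
    have hget : (pvBuildIdx d i (c :: cs)).get? c = (d.get? c).or (some i) := by
      rw [pvBuildIdx_get?]; simp [pvFirstIdx]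
    have hcont : d.contains c = (d.get? c).isSome := PySem.Dict.contains_eq_isSome_get? d c
    cases hg : d.get? c with
    | some m =>
      have h1 : d.contains c = true := by rw [hcont, hg]; rfl
      simp only [pvBuildIdx, h1, if_pos] at hget ⊢
      rw [List.cons_eq_cons]
      refine ⟨?_, ?_⟩
      · rw [PySem.Dict.getD_eq_get?_getD, hget, hg]; rfl
      · exact ih d (i + 1)
    | none =>
      have h1 : d.contains c = false := by rw [hcont, hg]; rfl
      simp only [pvBuildIdx, h1, if_neg, Bool.false_eq_true, not_false_iff] at hget ⊢
      rw [List.cons_eq_cons]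
      refine ⟨?_, ?_⟩
      · rw [PySem.Dict.getD_eq_get?_getD, hget, hg]; rfl
      · exact ih (d.insert c i) (i + 1)

lemma pvCanon_eq_incCanon (cs : List Char) : pvCanon cs = pvIncCanon PySem.Dict.empty 0 cs :=
  pvCanonMap_buildIdx cs PySem.Dict.empty 0

lemma pvIncCanon_length (d : PySem.Dict Char Int) (i : Int) (cs : List Char) :
    (pvIncCanon d i cs).length = cs.length := by
  induction cs generalizing d i with
  | nil => simp [pvIncCanon]
  | cons c cs ih =>
    simp only [pvIncCanon]
    cases d.get? c with
    | some m => simp [ih]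
    | none => simp [ih]

-- the invariant linking A's two index dicts to B's two char maps
def pvInv (dp dw : PySem.Dict Char Int) (f b : PySem.Dict Char Char) (i : Int) : Prop :=
  (∀ c n, dp.get? c = some n → n < i) ∧
  (∀ c n, dw.get? c = some n → n < i) ∧
  (∀ p, (f.get? p).isSome = (dp.get? p).isSome) ∧
  (∀ w, (b.get? w).isSome = (dw.get? w).isSome) ∧
  (∀ p w, f.get? p = some w ↔ ∃ n, dp.get? p = some n ∧ dw.get? w = some n) ∧
  (∀ p w, b.get? w = some p ↔ ∃ n, dp.get? p = some n ∧ dw.get? w = some n)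

lemma pvInv_succ {dp dw f b i} (h : pvInv dp dw f b i) : pvInv dp dw f b (i + 1) := by
  obtain ⟨h1, h2, h3, h4, h5, h6⟩ := h
  exact ⟨fun c n hc => lt_trans (h1 c n hc) (by omega),
         fun c n hc => lt_trans (h2 c n hc) (by omega), h3, h4, h5, h6⟩

lemma pvInv_insert {dp dw f b i} (p w : Char)
    (hp : dp.get? p = none) (hw : dw.get? w = none) (h : pvInv dp dw f b i) :
    pvInv (dp.insert p i) (dw.insert w i) (f.insert p w) (b.insert w p) (i + 1) := by
  obtain ⟨h1, h2, h3, h4, h5, h6⟩ := h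
  refine ⟨?_, ?_, ?_, ?_, ?_, ?_⟩
  · intro c n hc
    rw [PySem.Dict.get?_insert] at hc
    by_cases hcp : c = p
    · rw [if_pos hcp] at hc; cases hc; omega
    · rw [if_neg hcp] at hc; exact lt_trans (h1 c n hc) (by omega)
  · intro c n hc
    rw [PySem.Dict.get?_insert] at hc
    by_cases hcw : c = w
    · rw [if_pos hcw] at hc; cases hc; omega
    · rw [if_neg hcw] at hc; exact lt_trans (h2 c n hc) (by omega)
  · intro q
    rw [PySem.Dict.get?_insert, PySem.Dict.get?_insert]
    by_cases hq : q = p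
    · simp [hq]
    · simp only [if_neg hq]; exact h3 q
  · intro q
    rw [PySem.Dict.get?_insert, PySem.Dict.get?_insert]
    by_cases hq : q = w
    · simp [hq]
    · simp only [if_neg hq]; exact h4 q
  · intro q x
    rw [PySem.Dict.get?_insert, PySem.Dict.get?_insert, PySem.Dict.get?_insert]
    by_cases hq : q = p
    · simp only [if_pos hq]
      constructor
      · intro hx
        cases hx
        exact ⟨i, rfl, by simp⟩
      · rintro ⟨n, hn, hx⟩
        cases hn
        by_cases hxw : x = w
        · simp [hxw]
        · rw [if_neg hxw] at hx
          exact absurd (h2 x i hx) (by omega)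
    · simp only [if_neg hq]
      constructor
      · intro hx
        have := (h5 q x).mp hx
        obtain ⟨n, hn1, hn2⟩ := this
        by_cases hxw : x = w
        · subst hxw; rw [hw] at hn2; cases hn2
        · exact ⟨n, hn1, by rw [if_neg hxw]; exact hn2⟩
      · rintro ⟨n, hn1, hn2⟩
        by_cases hxw : x = w
        · rw [if_pos hxw] at hn2; cases hn2
          exact absurd (h1 q i hn1) (by omega)
        · rw [if_neg hxw] at hn2
          exact (h5 q x).mpr ⟨n, hn1, hn2⟩
  · intro q x
    rw [PySem.Dict.get?_insert, PySem.Dict.get?_insert, PySem.Dict.get?_insert]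
    by_cases hx : x = w
    · simp only [if_pos hx]
      constructor
      · intro hq
        cases hq
        exact ⟨i, by simp, rfl⟩
      · rintro ⟨n, hn, hx2⟩
        cases hx2
        by_cases hqp : q = p
        · simp [hqp]
        · rw [if_neg hqp] at hn
          exact absurd (h1 q i hn) (by omega)
    · simp only [if_neg hx]
      constructor
      · intro hq
        have := (h6 q x).mp hq
        obtain ⟨n, hn1, hn2⟩ := this
        by_cases hqp : q = p
        · subst hqp; rw [hp] at hn1; cases hn1
        · exact ⟨n, by rw [if_neg hqp]; exact hn1, hn2⟩
      · rintro ⟨n, hn1, hn2⟩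
        by_cases hqp : q = p
        · rw [if_pos hqp] at hn1; cases hn1
          exact absurd (h2 x i hn2) (by omega)
        · rw [if_neg hqp] at hn1
          exact (h6 q x).mpr ⟨n, hn1, hn2⟩

lemma pvKey (ps : List Char) : ∀ (ws : List Char) (dp dw : PySem.Dict Char Int)
    (f b : PySem.Dict Char Char) (i : Int), ps.length = ws.length → pvInv dp dw f b i →
    (pvGoB f b (ps.zip ws) = true ↔ pvIncCanon dp i ps = pvIncCanon dw i ws) := by
  induction ps with
  | nil =>
    intro ws dp dw f b i hlen _
    cases ws with
    | nil => simp [pvGoB, pvIncCanon]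
    | cons w ws => simp at hlen
  | cons p ps ih =>
    intro ws dp dw f b i hlen hinv
    cases ws with
    | nil => simp at hlen
    | cons w ws =>
      have hlen' : ps.length = ws.length := by simpa using hlen
      obtain ⟨h1, h2, h3, h4, h5, h6⟩ := hinv
      simp only [List.zip_cons_cons, pvGoB, pvIncCanon]
      cases hdp : dp.get? p with
      | some m =>
        have hf : (f.get? p).isSome := by rw [h3, hdp]; rfl
        obtain ⟨x, hx⟩ := Option.isSome_iff_exists.mp hf
        obtain ⟨n0, hn1, hn2⟩ := (h5 p x).mp hx
        rw [hdp] at hn1; cases hn1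
        cases hdw : dw.get? w with
        | some n =>
          by_cases hmn : m = n
          · subst hmn
            have hfw : f.get? p = some w := (h5 p w).mpr ⟨m, hdp, hdw⟩
            rw [hx] at hfw; cases hfw
            have hb : b.get? w = some p := (h6 p w).mpr ⟨m, hdp, hdw⟩
            rw [hx, hb]
            simp only [List.cons_eq_cons, true_and, if_true]
            exact ih ws dp dw f b (i + 1) hlen' (pvInv_succ ⟨h1, h2, h3, h4, h5, h6⟩)
          · have hxw : x ≠ w := by
              intro he; subst he
              rw [hdw] at hn2; cases hn2; exact hmn rfl
            rw [hx]
            simp only [if_neg hxw, List.cons_eq_cons, Bool.false_eq_true, false_iff, not_and]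
            intro hc
            exact absurd hc hmn
        | none =>
          have hxw : x ≠ w := by
            intro he; subst he; rw [hdw] at hn2; cases hn2
          rw [hx]
          simp only [if_neg hxw, List.cons_eq_cons, Bool.false_eq_true, false_iff, not_and]
          intro hc
          exact absurd hc (by have := h1 p m hdp; omega)
      | none =>
        have hf : f.get? p = none := by
          have := h3 p; rw [hdp] at this
          exact Option.eq_none_iff_forall_ne_some.mpr (fun x hx => by
            rw [hx] at this; simp at this)
        rw [hf]
        cases hdw : dw.get? w with
        | some n =>
          have hb : (b.get? w).isSome := by rw [h4, hdw]; rfl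
          obtain ⟨y, hy⟩ := Option.isSome_iff_exists.mp hb
          obtain ⟨n0, hn1, hn2⟩ := (h6 y w).mp hy
          rw [hdw] at hn2; cases hn2
          have hyp : y ≠ p := by
            intro he; subst he; rw [hdp] at hn1; cases hn1
          rw [hy]
          simp only [if_neg hyp, List.cons_eq_cons, Bool.false_eq_true, false_iff, not_and]
          intro hc
          exact absurd hc.symm (by have := h2 w n hdw; omega)
        | none =>
          have hb : b.get? w = none := by
            have := h4 w; rw [hdw] at this
            exact Option.eq_none_iff_forall_ne_some.mpr (fun x hx => by
              rw [hx] at this; simp at this)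
          rw [hb]
          simp only [List.cons_eq_cons, true_and]
          exact ih ws (dp.insert p i) (dw.insert w i) (f.insert p w) (b.insert w p) (i + 1)
            hlen' (pvInv_insert p w hdp hdw ⟨h1, h2, h3, h4, h5, h6⟩)

lemma pvInv_init : pvInv PySem.Dict.empty PySem.Dict.empty PySem.Dict.empty PySem.Dict.empty 0 := by
  refine ⟨?_, ?_, ?_, ?_, ?_, ?_⟩ <;> intros <;>
    simp_all [PySem.Dict.get?_empty]

lemma pvMatches_eq (pattern w : String) :
    (pvCanon pattern.toList == pvCanon w.toList) = pvMatches pattern w := by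
  rw [pvMatches]
  by_cases hlen : pattern.toList.length = w.toList.length
  · have hl : ¬ (PySem.Str.len w ≠ PySem.Str.len pattern) := by
      simp only [PySem.Str.len_eq, ne_eq, not_not]
      exact_mod_cast hlen.symm
    rw [if_neg hl]
    have hkey := pvKey pattern.toList w.toList PySem.Dict.empty PySem.Dict.empty
      PySem.Dict.empty PySem.Dict.empty 0 hlen pvInv_init
    rw [pvCanon_eq_incCanon, pvCanon_eq_incCanon]
    cases hg : pvGoB PySem.Dict.empty PySem.Dict.empty (pattern.toList.zip w.toList) with
    | true => simp [hkey.mp hg]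
    | false =>
      rw [hg] at hkey
      simp only [Bool.false_eq_true, false_iff] at hkey
      simp [beq_eq_false_iff_ne.mpr hkey]
  · have hl : (PySem.Str.len w ≠ PySem.Str.len pattern) := by
      simp only [PySem.Str.len_eq, ne_eq]
      intro hc
      exact hlen (by exact_mod_cast hc.symm)
    rw [if_pos hl]
    apply beq_eq_false_iff_ne.mpr
    intro hc
    apply hlen
    have h2 := congrArg List.length hc
    rw [pvCanon_eq_incCanon, pvCanon_eq_incCanon, pvIncCanon_length, pvIncCanon_length] at h2
    exact h2

-- ===== VERDICT (by name: the statement is the Claim_ definition above) =====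
theorem findAndReplacePattern_spec : Claim_equal_findAndReplacePattern := by
  intro words pattern _
  unfold Spec_findAndReplacePattern findAndReplacePattern findAndReplacePattern_alt
  rw [PySem.List.foldl_append_if]
  simp only [List.nil_append, List.map_id']
  exact List.filter_congr (fun w _ => pvMatches_eq pattern w)
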